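-- pv_equiv track=rewrite | github.com/taskmasterpeace/Career-Captain | core/ai_manager.py | _parse_list_response
-- ===== SOURCE A (Python) =====
-- from typing import List, Dict, Any
-- from typing import Dict, Any, List
--
-- def _parse_list_response(response: str) -> Dict[str, List[str]]:
--     lines = response.strip().split('\n')
--     result = {}
--     current_category = None
--     for line in lines:
--         if line.startswith(('1.', '2.', '3.', '4.', '5.')):
--             current_category = line[3:].strip()
--             result[current_category] = []
--         elif current_category and line.strip():
--             result[current_category].append(line.strip())
--     return result
-- ===== SOURCE B (Python) =====
-- def _parse_list_response(response):
--     HEADERS = ('1.', '2.', '3.', '4.', '5.')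
--     lines = response.strip().split('\n')
--     result = {}
--     # skip everything before the first numbered header
--     i = next((k for k, ln in enumerate(lines) if ln.startswith(HEADERS)), len(lines))
--     rest = lines[i:]
--     # block decomposition: each header owns the slice of lines up to the next header
--     while rest:
--         header, tail = rest[0], rest[1:]
--         j = next((k for k, ln in enumerate(tail) if ln.startswith(HEADERS)), len(tail))
--         body, rest = tail[:j], tail[j:]
--         result[header[3:].strip()] = [s for s in (ln.strip() for ln in body) if s]
--     return result
-- ===== Notes on version B (the rewrite author's own statement) =====
-- stated objective: alternative
-- what changed: Replaced the single-pass state machine (current_category flag mutated line by line) by a block decomposition: skip to the first header, then repeatedly split off the slice of lines up to the next header and assign the whole stripped block to its category at once (last assignment wins on duplicates).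
-- intended difference: On responses whose last numbered header with an empty title (e.g. a bare '1.') is followed by non-blank lines, A returns [] for the '' category because the empty name is falsy and its append guard never fires, while B returns those stripped lines; keeping the block's items is the intended behaviour. — e.g. on _parse_list_response("1.\nx"): A returns [("", [])], B returns [("", ["x"])]
import Mathlib
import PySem

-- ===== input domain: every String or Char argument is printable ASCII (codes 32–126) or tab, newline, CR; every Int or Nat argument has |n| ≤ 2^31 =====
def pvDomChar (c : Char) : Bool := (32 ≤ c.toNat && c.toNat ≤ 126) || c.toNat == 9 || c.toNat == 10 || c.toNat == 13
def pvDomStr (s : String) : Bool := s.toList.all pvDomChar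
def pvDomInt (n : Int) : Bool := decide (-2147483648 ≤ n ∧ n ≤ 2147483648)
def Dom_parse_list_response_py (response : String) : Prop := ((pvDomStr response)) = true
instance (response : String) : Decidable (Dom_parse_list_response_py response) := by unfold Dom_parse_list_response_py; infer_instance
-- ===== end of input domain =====

-- B replaces A's single-pass state machine (mutable current_category) by a block decomposition
-- (alternative decomposition, same cost); B intentionally keeps the body lines of a header whose
-- title is empty, which A drops (see D_ below).

-- ===== PORT A =====
-- response.strip().split('\n')
def linesOf (response : String) : List String :=
  (PySem.Str.split? (PySem.Str.strip response) "\n").getD []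

-- line.startswith(('1.', '2.', '3.', '4.', '5.'))
def isHdr (l : String) : Bool :=
  PySem.Str.startswith l "1." || PySem.Str.startswith l "2." || PySem.Str.startswith l "3." ||
  PySem.Str.startswith l "4." || PySem.Str.startswith l "5."

-- line[3:].strip()
def stripAt3 (l : String) : String := PySem.Str.strip (PySem.Str.slice l (some 3) none)

def parseA_step (st : PySem.Dict String (List String) × Option String) (line : String) :
    PySem.Dict String (List String) × Option String :=
  if isHdr line then
    let c := stripAt3 line
    (st.1.insert c [], some c)
  else
    match st.2 with
    | some c =>
        if c ≠ "" ∧ PySem.Str.strip line ≠ "" then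
          (st.1.modify c [] (fun xs => xs ++ [PySem.Str.strip line]), some c)
        else st
    | none => st

def parse_list_response_py (response : String) : List (String × List String) :=
  let lines := linesOf response
  (lines.foldl parseA_step (PySem.Dict.empty, none)).1.items

-- ===== PORT B =====
-- [s for s in (ln.strip() for ln in body) if s]
def stripNonEmpty (body : List String) : List String :=
  (body.map PySem.Str.strip).filter (fun s => s ≠ "")

def parseB_blocks : List String → PySem.Dict String (List String) → PySem.Dict String (List String)
  | [], result => result
  | header :: tail, result =>
      let body := tail.takeWhile (fun l => !isHdr l)
      let rest := tail.dropWhile (fun l => !isHdr l)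
      parseB_blocks rest (result.insert (stripAt3 header) (stripNonEmpty body))
termination_by ls _ => ls.length
decreasing_by
  simp only [List.length_cons]
  exact Nat.lt_succ_of_le (List.length_dropWhile_le _ _)

def parse_list_response_py_alt (response : String) : List (String × List String) :=
  let lines := linesOf response
  (parseB_blocks (lines.dropWhile (fun l => !isHdr l)) PySem.Dict.empty).items

-- ===== PRECONDITION & SPEC =====
-- flag scan over the input lines: first component = "the most recent header has an empty
-- title", second = "that header is followed by a non-blank line before any further header"
def scanStep (st : Bool × Bool) (line : String) : Bool × Bool :=
  if isHdr line then (stripAt3 line == "", !(stripAt3 line == "") && st.2)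
  else (st.1, st.2 || (st.1 && !(PySem.Str.strip line == "")))

-- On responses whose last numbered header with an empty title is followed by non-blank lines,
-- A returns [] for the '' category (the empty name is falsy, so A's append guard never fires)
-- while B returns those stripped lines; keeping the block's items is the intended behaviour.
def D_parse_list_response_py (response : String) : Prop :=
  ((linesOf response).foldl scanStep (false, false)).2 = true
instance (response : String) : Decidable (D_parse_list_response_py response) := by unfold D_parse_list_response_py; infer_instance

def Spec_parse_list_response_py (response : String) (out : List (String × List String)) : Prop :=
  ¬ D_parse_list_response_py response → out = parse_list_response_py_alt response
instance (response : String) (out : List (String × List String)) : Decidable (Spec_parse_list_response_py response out) := by unfold Spec_parse_list_response_py; infer_instance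

def pvDiffWitness_parse_list_response_py : String := "1.\nx"
def pvDiffWitnessOut_parse_list_response_py : (List (String × List String)) × (List (String × List String)) :=
  ([("", [])], [("", ["x"])])

-- ===== CLAIM =====
def Claim_unchanged_parse_list_response_py : Prop := ∀ (response : String), Dom_parse_list_response_py response → Spec_parse_list_response_py response (parse_list_response_py response)
def Claim_changed_parse_list_response_py : Prop := Dom_parse_list_response_py (pvDiffWitness_parse_list_response_py) ∧ D_parse_list_response_py (pvDiffWitness_parse_list_response_py) ∧ parse_list_response_py (pvDiffWitness_parse_list_response_py) = pvDiffWitnessOut_parse_list_response_py.1 ∧ parse_list_response_py_alt (pvDiffWitness_parse_list_response_py) = pvDiffWitnessOut_parse_list_response_py.2 ∧ pvDiffWitnessOut_parse_list_response_py.1 ≠ pvDiffWitnessOut_parse_list_response_py.2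
def Claim_exact_parse_list_response_py : Prop := ∀ (response : String), Dom_parse_list_response_py response → D_parse_list_response_py response → parse_list_response_py response ≠ parse_list_response_py_alt response

-- ===== LEMMAS AND PROOFS =====

-- (category title, body lines) of each numbered block of the input
def blockify : List String → List (String × List String)
  | [] => []
  | header :: tail =>
      (stripAt3 header, tail.takeWhile (fun l => !isHdr l)) ::
        blockify (tail.dropWhile (fun l => !isHdr l))
termination_by ls => ls.length
decreasing_by
  simp only [List.length_cons]
  exact Nat.lt_succ_of_le (List.length_dropWhile_le _ _)

-- body of the LAST block whose category is k (later blocks win)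
def lastBody (k : String) : List (String × List String) → Option (List String)
  | [] => none
  | p :: L => match lastBody k L with
              | some b => some b
              | none => if p.1 = k then some p.2 else none

-- the effect of one block on the scanner's "bad" flag
def gstep (bad : Bool) (p : String × List String) : Bool :=
  if p.1 = "" then p.2.any (fun l => !(PySem.Str.strip l == "")) else bad

-- what A ends up storing for a finished block: [] when the category name is empty (A's
-- truthiness guard never fires), otherwise the stripped non-empty body lines
def fA (c : String) (body : List String) : List String := if c = "" then [] else stripNonEmpty body

-- what B stores for a block
def fB (_ : String) (body : List String) : List String := stripNonEmpty body

-- both block recursions as one fold over the (category, body) pairs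
def genFoldInsert (f : String → List String → List String)
    (L : List (String × List String)) (d : PySem.Dict String (List String)) :
    PySem.Dict String (List String) :=
  L.foldl (fun d p => d.insert p.1 (f p.1 p.2)) d

lemma blockify_cons (h : String) (t : List String) :
    blockify (h :: t)
      = (stripAt3 h, t.takeWhile (fun l => !isHdr l)) :: blockify (t.dropWhile (fun l => !isHdr l)) := by
  rw [blockify]

lemma parseB_cons (h : String) (t : List String) (r : PySem.Dict String (List String)) :
    parseB_blocks (h :: t) r
      = parseB_blocks (t.dropWhile (fun l => !isHdr l))
          (r.insert (stripAt3 h) (stripNonEmpty (t.takeWhile (fun l => !isHdr l)))) := by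
  rw [parseB_blocks]

-- B's recursion is the fold over the block list
lemma B_to_blocks : ∀ (n : Nat) (ls : List String), ls.length ≤ n →
    ∀ (d : PySem.Dict String (List String)),
      parseB_blocks ls d = genFoldInsert fB (blockify ls) d := by
  intro n
  induction n using Nat.strong_induction_on with
  | _ n ih =>
    intro ls hlen d
    rcases ls with _ | ⟨h, t⟩
    · rw [parseB_blocks, blockify]; rfl
    · have htlen : (t.dropWhile (fun l => !isHdr l)).length < n := by
        have h1 : (t.dropWhile (fun l => !isHdr l)).length ≤ t.length :=
          List.length_dropWhile_le _ _
        simp only [List.length_cons] at hlen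
        omega
      rw [parseB_cons, blockify_cons, ih _ htlen _ (le_refl _)]
      rfl

-- appending to the key just inserted = inserting the extended list
lemma modify_insert (d : PySem.Dict String (List String)) (c : String) (v w : List String) :
    (d.insert c v).modify c [] (fun xs => xs ++ w) = d.insert c (v ++ w) := by
  simp [PySem.Dict.modify, PySem.Dict.getD_insert_self, PySem.Dict.insert_insert_self]

-- folding A's step over a header-free block, category already current and inserted
lemma A_body (c : String) (hc : c ≠ "") :
    ∀ (body : List String), (∀ l ∈ body, isHdr l = false) →
    ∀ (d : PySem.Dict String (List String)) (v : List String),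
      body.foldl parseA_step (d.insert c v, some c) = (d.insert c (v ++ stripNonEmpty body), some c) := by
  intro body
  induction body with
  | nil => intro _ d v; simp [stripNonEmpty]
  | cons l rest ih =>
      intro hb d v
      have hl : isHdr l = false := hb l (by simp)
      have hrest : ∀ x ∈ rest, isHdr x = false := fun x hx => hb x (by simp [hx])
      by_cases hs : PySem.Str.strip l = ""
      · simp only [List.foldl_cons, parseA_step, hl, Bool.false_eq_true, if_false]
        simp only [hs, ne_eq, not_true_eq_false, and_false, if_false]
        rw [ih hrest d v]
        simp [stripNonEmpty, hs]
      · simp only [List.foldl_cons, parseA_step, hl, Bool.false_eq_true, if_false]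
        simp only [ne_eq, hc, not_false_iff, hs, and_true, if_true]
        rw [modify_insert, ih hrest d (v ++ [PySem.Str.strip l])]
        simp [stripNonEmpty, hs]

-- with an empty current category A's elif never fires over a header-free block
lemma A_body_empty :
    ∀ (body : List String), (∀ l ∈ body, isHdr l = false) →
    ∀ (st : PySem.Dict String (List String) × Option String), st.2 = some "" →
      body.foldl parseA_step st = st := by
  intro body
  induction body with
  | nil => intro _ st _; rfl
  | cons l rest ih =>
      intro hb st hst
      have hl : isHdr l = false := hb l (by simp)
      have hrest : ∀ x ∈ rest, isHdr x = false := fun x hx => hb x (by simp [hx])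
      have hstep : parseA_step st l = st := by
        obtain ⟨d, cc⟩ := st
        simp at hst
        simp [parseA_step, hl, hst]
      rw [List.foldl_cons, hstep, ih hrest st hst]

lemma A_body_all (c : String) (body : List String) (hb : ∀ l ∈ body, isHdr l = false)
    (d : PySem.Dict String (List String)) :
    body.foldl parseA_step (d.insert c [], some c) = (d.insert c (fA c body), some c) := by
  by_cases hc : c = ""
  · subst hc
    rw [A_body_empty body hb _ rfl]
    simp [fA]
  · rw [A_body c hc body hb d []]
    simp [fA, hc]

-- the main invariant: from the state right after a header was processed, A's remaining fold
-- is the fold of fA over the remaining blocks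
lemma L_some : ∀ (n : Nat) (ls : List String), ls.length ≤ n →
    ∀ (d : PySem.Dict String (List String)) (c : String),
      (ls.foldl parseA_step (d.insert c [], some c)).1
        = genFoldInsert fA (blockify (ls.dropWhile (fun l => !isHdr l)))
            (d.insert c (fA c (ls.takeWhile (fun l => !isHdr l)))) := by
  intro n
  induction n using Nat.strong_induction_on with
  | _ n ih =>
    intro ls hlen d c
    have hsplit : ls = ls.takeWhile (fun l => !isHdr l) ++ ls.dropWhile (fun l => !isHdr l) :=
      (List.takeWhile_append_dropWhile).symm
    have hbody : ∀ l ∈ ls.takeWhile (fun l => !isHdr l), isHdr l = false := by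
      intro l hl
      have := List.mem_takeWhile_imp hl
      simpa using this
    conv_lhs => rw [hsplit, List.foldl_append, A_body_all c _ hbody d]
    rcases hrest : ls.dropWhile (fun l => !isHdr l) with _ | ⟨h, t⟩
    · rw [blockify]; rfl
    · have hh : isHdr h = true := by
        have := List.head_dropWhile_not (fun l => !isHdr l) (l := ls)
        rw [hrest] at this
        simpa using this (by simp)
      have htlen : t.length < n := by
        have h1 : (ls.dropWhile (fun l => !isHdr l)).length ≤ ls.length :=
          List.length_dropWhile_le _ _
        rw [hrest] at h1
        simp only [List.length_cons] at h1
        omega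
      rw [List.foldl_cons]
      simp only [parseA_step, hh, if_true]
      rw [ih t.length htlen t (le_refl _)
            (d.insert c (fA c (ls.takeWhile (fun l => !isHdr l)))) (stripAt3 h)]
      rw [blockify_cons]
      rfl

-- before the first header A drops every line
lemma L_none : ∀ (ls : List String) (d : PySem.Dict String (List String)),
    (ls.foldl parseA_step (d, none)).1
      = genFoldInsert fA (blockify (ls.dropWhile (fun l => !isHdr l))) d := by
  intro ls
  induction ls with
  | nil => intro d; rw [List.dropWhile_nil, blockify]; rfl
  | cons l rest ih =>
      intro d
      by_cases hl : isHdr l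
      · rw [List.foldl_cons]
        simp only [parseA_step, hl, if_true]
        rw [L_some rest.length rest (le_refl _) d (stripAt3 l)]
        have : (l :: rest).dropWhile (fun l => !isHdr l) = l :: rest := by
          rw [List.dropWhile_cons]
          simp [hl]
        rw [this, blockify_cons]
        rfl
      · rw [List.foldl_cons]
        simp only [parseA_step, hl, Bool.false_eq_true, if_false]
        rw [ih d]
        have : (l :: rest).dropWhile (fun l => !isHdr l) = rest.dropWhile (fun l => !isHdr l) := by
          rw [List.dropWhile_cons]
          simp [hl]
        rw [this]

-- the fold's final value at a key is f applied to the LAST block with that category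
lemma getD_fold (f : String → List String → List String) :
    ∀ (L : List (String × List String)) (d : PySem.Dict String (List String)) (k : String),
      (genFoldInsert f L d).getD k []
        = match lastBody k L with
          | some b => f k b
          | none => d.getD k [] := by
  intro L
  induction L with
  | nil => intro d k; rfl
  | cons p t ih =>
      intro d k
      rw [genFoldInsert, List.foldl_cons]
      rw [show (t.foldl (fun d p => d.insert p.1 (f p.1 p.2)) (d.insert p.1 (f p.1 p.2)))
            = genFoldInsert f t (d.insert p.1 (f p.1 p.2)) from rfl, ih]
      rcases hlb : lastBody k t with _ | b
      · rw [lastBody, hlb]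
        rw [PySem.Dict.getD_insert]
        by_cases hk : p.1 = k
        · subst hk; simp
        · simp [hk, Ne.symm hk]
      · rw [lastBody, hlb]

lemma keys_fold (f : String → List String → List String) (L : List (String × List String))
    (d : PySem.Dict String (List String)) :
    (genFoldInsert f L d).keys = PySem.Set.update d.keys (L.map Prod.fst) := by
  exact PySem.Dict.keys_foldl_insert_key L Prod.fst (fun d p => f p.1 p.2) d

lemma nodup_fold (f : String → List String → List String) (L : List (String × List String)) :
    (genFoldInsert f L PySem.Dict.empty).keys.Nodup := by
  exact PySem.Dict.nodup_keys_foldl_insert_key L Prod.fst (fun d p => f p.1 p.2)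
    PySem.Dict.empty PySem.Dict.nodup_keys_empty

-- two folds whose stored values agree at the last block of every category give the same dict
lemma fold_eq_of_lastAgree (f g : String → List String → List String)
    (L : List (String × List String))
    (hfg : ∀ k b, lastBody k L = some b → f k b = g k b) :
    genFoldInsert f L PySem.Dict.empty = genFoldInsert g L PySem.Dict.empty := by
  apply PySem.Dict.ext
  rw [PySem.Dict.items_eq_map_keys _ (nodup_fold f L) [],
      PySem.Dict.items_eq_map_keys _ (nodup_fold g L) [],
      keys_fold, keys_fold]
  apply List.map_congr_left
  intro k _
  rw [getD_fold, getD_fold]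
  rcases hlb : lastBody k L with _ | b
  · rfl
  · exact congrArg (fun v => (k, v)) (hfg k b hlb)

-- the scanner over a header-free block only accumulates "some line is non-blank"
lemma scan_body : ∀ (body : List String), (∀ l ∈ body, isHdr l = false) →
    ∀ (le bad : Bool),
      body.foldl scanStep (le, bad)
        = (le, bad || (le && body.any (fun l => !(PySem.Str.strip l == "")))) := by
  intro body
  induction body with
  | nil => intro _ le bad; simp
  | cons l rest ih =>
      intro hb le bad
      have hl : isHdr l = false := hb l (by simp)
      have hrest : ∀ x ∈ rest, isHdr x = false := fun x hx => hb x (by simp [hx])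
      rw [List.foldl_cons]
      simp only [scanStep, hl, Bool.false_eq_true, if_false]
      rw [ih hrest]
      cases le <;> cases bad <;> simp

-- the scanner from the state right after a header = gstep folded over the remaining blocks
lemma scan_some : ∀ (n : Nat) (ls : List String), ls.length ≤ n →
    ∀ (c : String) (bad : Bool),
      (ls.foldl scanStep ((c == ""), bad)).2
        = (blockify (ls.dropWhile (fun l => !isHdr l))).foldl gstep
            (bad || ((c == "") && (ls.takeWhile (fun l => !isHdr l)).any
              (fun l => !(PySem.Str.strip l == "")))) := by
  intro n
  induction n using Nat.strong_induction_on with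
  | _ n ih =>
    intro ls hlen c bad
    have hsplit : ls = ls.takeWhile (fun l => !isHdr l) ++ ls.dropWhile (fun l => !isHdr l) :=
      (List.takeWhile_append_dropWhile).symm
    have hbody : ∀ l ∈ ls.takeWhile (fun l => !isHdr l), isHdr l = false := by
      intro l hl
      have := List.mem_takeWhile_imp hl
      simpa using this
    conv_lhs => rw [hsplit, List.foldl_append, scan_body _ hbody]
    rcases hrest : ls.dropWhile (fun l => !isHdr l) with _ | ⟨h, t⟩
    · rw [blockify]; rfl
    · have hh : isHdr h = true := by
        have := List.head_dropWhile_not (fun l => !isHdr l) (l := ls)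
        rw [hrest] at this
        simpa using this (by simp)
      have htlen : t.length < n := by
        have h1 : (ls.dropWhile (fun l => !isHdr l)).length ≤ ls.length :=
          List.length_dropWhile_le _ _
        rw [hrest] at h1
        simp only [List.length_cons] at h1
        omega
      rw [List.foldl_cons]
      simp only [scanStep, hh, if_true]
      rw [ih t.length htlen t (le_refl _) (stripAt3 h)
            (!(stripAt3 h == "") && (bad || ((c == "") && (ls.takeWhile (fun l => !isHdr l)).any (fun l => !(PySem.Str.strip l == ""))))) ]
      rw [blockify_cons, List.foldl_cons]
      refine congrArg (fun b => List.foldl gstep b (blockify (t.dropWhile (fun l => !isHdr l)))) ?_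
      simp only [gstep]
      by_cases he : stripAt3 h = ""
      · simp [he]
      · have hbe : (stripAt3 h == "") = false := by simp [he]
        simp [he, hbe]

-- the whole scanner = gstep folded over the block list
lemma scan_none : ∀ (ls : List String) (bad : Bool),
    (ls.foldl scanStep (false, bad)).2
      = (blockify (ls.dropWhile (fun l => !isHdr l))).foldl gstep bad := by
  intro ls
  induction ls with
  | nil => intro bad; rw [List.dropWhile_nil, blockify]; rfl
  | cons l rest ih =>
      intro bad
      by_cases hl : isHdr l
      · rw [List.foldl_cons]
        simp only [scanStep, hl, if_true]
        rw [scan_some rest.length rest (le_refl _) (stripAt3 l) (!(stripAt3 l == "") && bad)]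
        have hd : (l :: rest).dropWhile (fun l => !isHdr l) = l :: rest := by
          rw [List.dropWhile_cons]; simp [hl]
        rw [hd, blockify_cons, List.foldl_cons]
        refine congrArg (fun b => List.foldl gstep b (blockify (rest.dropWhile (fun l => !isHdr l)))) ?_
        simp only [gstep]
        by_cases he : stripAt3 l = ""
        · simp [he]
        · have hbe : (stripAt3 l == "") = false := by simp [he]
          simp [he, hbe]
      · rw [List.foldl_cons]
        have : scanStep (false, bad) l = (false, bad) := by
          simp [scanStep, hl]
        rw [this, ih bad]
        have hd : (l :: rest).dropWhile (fun l => !isHdr l) = rest.dropWhile (fun l => !isHdr l) := by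
          rw [List.dropWhile_cons]; simp [hl]
        rw [hd]

-- gstep's fold reads off the body of the last empty-titled block
lemma foldg : ∀ (L : List (String × List String)) (b : Bool),
    L.foldl gstep b
      = match lastBody "" L with
        | some bb => bb.any (fun l => !(PySem.Str.strip l == ""))
        | none => b := by
  intro L
  induction L with
  | nil => intro b; rfl
  | cons p t ih =>
      intro b
      rw [List.foldl_cons, ih]
      rcases hlb : lastBody "" t with _ | bb
      · rw [lastBody, hlb]
        simp only [gstep]
        by_cases hp : p.1 = "" <;> simp [hp]
      · rw [lastBody, hlb]

-- D_ in terms of the last empty-titled block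
lemma D_iff_blocks (response : String) :
    D_parse_list_response_py response
      ↔ match lastBody "" (blockify ((linesOf response).dropWhile (fun l => !isHdr l))) with
        | some bb => (bb.any (fun l => !(PySem.Str.strip l == ""))) = true
        | none => False := by
  unfold D_parse_list_response_py
  rw [scan_none, foldg]
  rcases lastBody "" (blockify ((linesOf response).dropWhile (fun l => !isHdr l))) with _ | bb
  · simp
  · simp

-- the D_ test on a body is exactly "its stripped non-empty lines are not []"
lemma anyNe_iff (b : List String) :
    (b.any (fun l => !(PySem.Str.strip l == ""))) = true ↔ stripNonEmpty b ≠ [] := by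
  simp [stripNonEmpty, List.any_eq_true, List.filter_eq_nil_iff]

-- evaluating the two ports and D_ at the witness "1.\nx"
lemma wit_lines : linesOf "1.\nx" = ["1.", "x"] := by decide

lemma wit_drop : (["1.", "x"].dropWhile (fun l => !isHdr l)) = ["1.", "x"] := by decide

lemma wit_B : parseB_blocks ["1.", "x"] PySem.Dict.empty = PySem.Dict.mk [("", ["x"])] := by
  rw [parseB_blocks.eq_def]
  simp only []
  rw [parseB_blocks.eq_def]
  decide

-- ===== VERDICT =====
theorem parse_list_response_py_spec : Claim_unchanged_parse_list_response_py := by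
  intro response _ hD
  unfold parse_list_response_py parse_list_response_py_alt
  simp only []
  rw [L_none, B_to_blocks _ _ (le_refl _)]
  refine congrArg PySem.Dict.items (fold_eq_of_lastAgree fA fB _ ?_)
  intro k b hlb
  by_cases hk : k = ""
  · subst hk
    have hbody : stripNonEmpty b = [] := by
      by_contra hne
      apply hD
      rw [D_iff_blocks response]
      rw [hlb]
      exact (anyNe_iff b).mpr hne
    simp [fA, fB, hbody]
  · simp [fA, fB, hk]

theorem parse_list_response_py_changed : Claim_changed_parse_list_response_py := by
  unfold Claim_changed_parse_list_response_py pvDiffWitness_parse_list_response_py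
    pvDiffWitnessOut_parse_list_response_py
  refine ⟨by decide, ?_, by decide, ?_, by decide⟩
  · decide
  · unfold parse_list_response_py_alt
    simp only []
    rw [wit_lines, wit_drop, wit_B]

theorem parse_list_response_py_tight : Claim_exact_parse_list_response_py := by
  intro response _ hD hEq
  rw [D_iff_blocks response] at hD
  rcases hlb : lastBody "" (blockify ((linesOf response).dropWhile (fun l => !isHdr l))) with _ | b
  · rw [hlb] at hD
    exact hD
  · rw [hlb] at hD
    replace hD : stripNonEmpty b ≠ [] := (anyNe_iff b).mp hD
    unfold parse_list_response_py parse_list_response_py_alt at hEq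
    simp only [] at hEq
    rw [L_none, B_to_blocks _ _ (le_refl _)] at hEq
    have hdict : genFoldInsert fA (blockify ((linesOf response).dropWhile (fun l => !isHdr l))) PySem.Dict.empty
        = genFoldInsert fB (blockify ((linesOf response).dropWhile (fun l => !isHdr l))) PySem.Dict.empty :=
      PySem.Dict.ext hEq
    have := congrArg (fun d => PySem.Dict.getD d "" []) hdict
    simp only [] at this
    rw [getD_fold, getD_fold] at this
    rw [hlb] at this
    simp [fA, fB] at this
    exact hD this
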